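-- pv_equiv track=rewrite | github.com/bohdanbobrowski/pyrlament | pyrlament/generator.py | _generate_seats_order_l
-- ===== SOURCE A (Python) =====
-- def _generate_seats_order_l(offset: int = 0) -> list[list[int]]:
--     seats_order = []
--     sequence = [
--         [1, 4, 7, 10, 13, 16, 19, 22, 25, 28],
--         [2, 5, 8, 11, 14, 17, 20, 23, 26, 29],
--         [3, 6, 9, 12, 15, 18, 21, 24, 27, 30],
--     ]
--     for row in sequence:
--         new_row = []
--         for nr in row:
--             new_row.append(nr + offset)
--         seats_order.append(new_row)
--     return seats_order
-- ===== SOURCE B (Python) =====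
-- def _generate_seats_order_l(offset: int = 0) -> list[list[int]]:
--     return [[3 * c + r + 1 + offset for c in range(10)] for r in range(3)]
-- ===== Notes on version B (the rewrite author's own statement) =====
-- stated objective: simpler
-- what changed: B computes each seat number from a closed-form arithmetic expression of its row and column index instead of adding the offset to a hardcoded three-by-ten literal matrix.
import Mathlib
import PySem

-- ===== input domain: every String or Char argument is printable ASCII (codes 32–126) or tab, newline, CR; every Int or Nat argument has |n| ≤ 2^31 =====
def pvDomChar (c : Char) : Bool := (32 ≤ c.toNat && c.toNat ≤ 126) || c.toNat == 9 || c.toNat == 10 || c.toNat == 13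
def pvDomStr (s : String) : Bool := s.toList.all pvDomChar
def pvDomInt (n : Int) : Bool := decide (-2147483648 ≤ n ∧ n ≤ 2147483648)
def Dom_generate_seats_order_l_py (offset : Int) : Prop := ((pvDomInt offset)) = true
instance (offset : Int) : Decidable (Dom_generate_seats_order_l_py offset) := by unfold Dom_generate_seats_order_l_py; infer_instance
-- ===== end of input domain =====

-- B replaces A's hardcoded 3x10 seat matrix by the closed form 3*c + r + 1 + offset (objective: simpler).


-- ===== PORT A =====
-- literal port of A: hardcoded 3x10 matrix, nested loops appending nr + offset
def generate_seats_order_l_py (offset : Int) : List (List Int) :=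
  let sequence : List (List Int) :=
    [ [1, 4, 7, 10, 13, 16, 19, 22, 25, 28],
      [2, 5, 8, 11, 14, 17, 20, 23, 26, 29],
      [3, 6, 9, 12, 15, 18, 21, 24, 27, 30] ]
  sequence.foldl (fun seats_order row =>
    seats_order ++ [row.foldl (fun new_row nr => new_row ++ [nr + offset]) []]) []

-- ===== PORT B =====
-- port of B: closed form 3*c + r + 1 + offset over ranges
def generate_seats_order_l_py_alt (offset : Int) : List (List Int) :=
  (PySem.List.pyRange 0 3 1).map (fun r =>
    (PySem.List.pyRange 0 10 1).map (fun c => 3 * c + r + 1 + offset))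

-- ===== PRECONDITION & SPEC =====
def Spec_generate_seats_order_l_py (offset : Int) (out : List (List Int)) : Prop := out = generate_seats_order_l_py_alt offset
instance (offset : Int) (out : List (List Int)) : Decidable (Spec_generate_seats_order_l_py offset out) := by unfold Spec_generate_seats_order_l_py; infer_instance

-- ===== CLAIM (what is proved, stated in full; the proofs are below) =====
def Claim_equal_generate_seats_order_l_py : Prop := ∀ (offset : Int), Dom_generate_seats_order_l_py offset → Spec_generate_seats_order_l_py offset (generate_seats_order_l_py offset)

-- ===== LEMMAS AND PROOFS =====

-- ===== VERDICT (by name: the statement is the Claim_ definition above) =====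
theorem generate_seats_order_l_py_spec : Claim_equal_generate_seats_order_l_py := by
  intro offset _
  unfold Spec_generate_seats_order_l_py generate_seats_order_l_py generate_seats_order_l_py_alt
  simp [PySem.List.pyRange, List.range_succ]
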